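-- pv_equiv track=rewrite | github.com/NightRunner7/Zachary-s-Karate-Club-Social-Network | initialGraph/assistantFunctions.py | divide_odds_and_evens
-- ===== SOURCE A (Python) =====
-- def divide_odds_and_evens(numbers):
--     """
--     Divide a list of numbers into two separate lists based on odd and even indexes.
--
--     Parameters:
--     numbers (list of int): A list of integers to be divided into odd and even numbers.
--
--     Returns:
--     tuple of two lists (list of int, list of int):
--         - First list contains all odd numbers from the input.
--         - Second list contains all even numbers from the input.
--     """
--     odd_numbers = []  # List to hold odd indexes
--     even_numbers = []  # List to hold even indexes
--
--     # Iterate through each number in the input list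
--     for index in range(0, len(numbers)):
--         if index % 2 == 0:
--             even_numbers.append(numbers[index])  # Add even number to the even_numbers list
--         else:
--             odd_numbers.append(numbers[index])  # Add odd number to the odd_numbers list
--
--     return odd_numbers, even_numbers  # Return both lists as a tuple
-- ===== SOURCE B (Python) =====
-- def divide_odds_and_evens(numbers):
--     """Stride slices: odd-index elements are numbers[1::2], even-index
--     elements are numbers[::2]; no explicit loop or parity test."""
--     return list(numbers[1::2]), list(numbers[::2])
-- ===== Notes on version B (the rewrite author's own statement) =====
-- stated objective: idiomatic
-- what changed: Replaces the indexed loop with a per-element parity branch by two stride-2 slices (numbers[1::2] and numbers[::2]), so no explicit iteration or branching remains.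
import Mathlib
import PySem

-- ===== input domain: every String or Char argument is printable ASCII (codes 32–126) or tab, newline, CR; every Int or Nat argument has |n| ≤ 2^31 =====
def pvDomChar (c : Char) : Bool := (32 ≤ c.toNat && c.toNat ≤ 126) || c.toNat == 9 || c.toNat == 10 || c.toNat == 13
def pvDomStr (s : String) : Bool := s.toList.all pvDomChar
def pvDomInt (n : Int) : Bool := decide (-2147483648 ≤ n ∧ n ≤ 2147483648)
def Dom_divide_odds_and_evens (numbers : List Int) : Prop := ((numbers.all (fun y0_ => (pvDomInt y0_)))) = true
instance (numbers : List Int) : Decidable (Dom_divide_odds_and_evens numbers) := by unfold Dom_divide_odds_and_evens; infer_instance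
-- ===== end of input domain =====

-- ===== PORT A =====
-- header: B replaces A's indexed loop with parity branch by two stride-2 slices; return values only, neither mutates its argument.
def divide_odds_and_evens (numbers : List Int) : List Int × List Int :=
  -- literal port of A: for index in range(0, len(numbers)): parity branch, append
  (PySem.List.pyRange 0 (PySem.List.len numbers) 1).foldl
    (fun (st : List Int × List Int) index =>
      if PySem.Int.mod index 2 = 0 then (st.1, st.2 ++ [PySem.List.pyGetD numbers index 0])
      else (st.1 ++ [PySem.List.pyGetD numbers index 0], st.2))
    ([], [])

-- ===== PORT B =====
def divide_odds_and_evens_alt (numbers : List Int) : List Int × List Int :=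
  -- literal port of Source B: (numbers[1::2], numbers[::2]); slice? is `some` whenever
  -- the step is nonzero (Python raises only for step 0), so `.getD []` just extracts
  -- it; Python's list(...) wrapper is the identity on lists.
  ((PySem.List.slice? numbers (some 1) none 2).getD [],
   (PySem.List.slice? numbers none none 2).getD [])

-- ===== PRECONDITION & SPEC =====
def Spec_divide_odds_and_evens (numbers : List Int) (out : List Int × List Int) : Prop := out = divide_odds_and_evens_alt numbers
instance (numbers : List Int) (out : List Int × List Int) : Decidable (Spec_divide_odds_and_evens numbers out) := by unfold Spec_divide_odds_and_evens; infer_instance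

-- ===== CLAIM (what is proved, stated in full; the proofs are below) =====
def Claim_equal_divide_odds_and_evens : Prop := ∀ (numbers : List Int), Dom_divide_odds_and_evens numbers → Spec_divide_odds_and_evens numbers (divide_odds_and_evens numbers)

-- ===== LEMMAS AND PROOFS =====

-- (even-index elements, odd-index elements) of a list, the common reference point of both ports
def pvEO : List Int → List Int × List Int
  | [] => ([], [])
  | x :: t => (x :: (pvEO t).2, (pvEO t).1)

theorem pvEO_snd (t : List Int) : (pvEO t).2 = (pvEO t.tail).1 := by
  cases t <;> simp [pvEO]

-- the elements at indices 0, 2, 4, … of xs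
theorem pvStride : ∀ (n : Nat) (xs : List Int), n = (xs.length + 1) / 2 →
    (List.range n).filterMap (fun k => xs[2 * k]?) = (pvEO xs).1 := by
  intro n
  induction n with
  | zero =>
    intro xs h
    have : xs.length = 0 := by omega
    rw [List.length_eq_zero_iff] at this
    subst this
    simp [pvEO]
  | succ n ih =>
    intro xs h
    cases xs with
    | nil => simp at h
    | cons x t =>
      rw [List.range_succ_eq_map, List.filterMap_cons, List.filterMap_map]
      have hf : ((fun k => (x :: t)[2 * k]?) ∘ Nat.succ) = fun k : Nat => t.tail[2 * k]? := by
        funext k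
        show (x :: t)[2 * Nat.succ k]? = t.tail[2 * k]?
        have h2 : 2 * Nat.succ k = (2 * k + 1) + 1 := by omega
        rw [h2, List.getElem?_cons_succ]
        cases t with
        | nil => simp
        | cons y u => simp [List.getElem?_cons_succ]
      rw [hf, ih t.tail (by simp at h ⊢; omega)]
      simp [pvEO, pvEO_snd]

theorem pvSlice_evens (xs : List Int) :
    PySem.List.slice? xs none none 2 = some (pvEO xs).1 := by
  simp only [PySem.List.slice?, PySem.List.sliceIndices]
  norm_num
  have hif : (if 0 < xs.length then (((xs.length : Int) + 2 - 1) / 2).toNat else 0)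
      = (xs.length + 1) / 2 := by split <;> omega
  have hf : (fun k : Nat => xs[(2 * (k : Int)).toNat]?) = fun k : Nat => xs[2 * k]? := by
    funext k
    have h1 : ((2 : Int) * (k : Int)).toNat = 2 * k := by omega
    rw [h1]
  rw [hif, hf, pvStride ((xs.length + 1) / 2) xs rfl]

theorem pvSlice_odds (xs : List Int) :
    PySem.List.slice? xs (some 1) none 2 = some (pvEO xs).2 := by
  cases xs with
  | nil => decide
  | cons x t =>
    simp only [PySem.List.slice?, PySem.List.sliceIndices]
    norm_num
    have hif : (if 0 < t.length then (((t.length : Int) + 2 - 1) / 2).toNat else 0)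
        = (t.length + 1) / 2 := by split <;> omega
    have hf : (fun k : Nat => (x :: t)[((1 : Int) + 2 * (k : Int)).toNat]?) =
        fun k : Nat => t[2 * k]? := by
      funext k
      have h1 : ((1 : Int) + 2 * (k : Int)).toNat = (2 * k) + 1 := by omega
      rw [h1]
      exact List.getElem?_cons_succ
    rw [hif, hf, pvStride ((t.length + 1) / 2) t rfl]
    simp [pvEO]

theorem pvAlt_eq (xs : List Int) :
    divide_odds_and_evens_alt xs = ((pvEO xs).2, (pvEO xs).1) := by
  unfold divide_odds_and_evens_alt
  rw [pvSlice_odds, pvSlice_evens]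
  rfl

theorem pvA_enum (xs : List Int) : ∀ (s : Int) (o e : List Int),
    (PySem.List.enumerate xs s).foldl
      (fun (st : List Int × List Int) (p : Int × Int) =>
        if PySem.Int.mod p.1 2 = 0 then (st.1, st.2 ++ [p.2]) else (st.1 ++ [p.2], st.2)) (o, e) =
      if PySem.Int.mod s 2 = 0 then (o ++ (pvEO xs).2, e ++ (pvEO xs).1)
      else (o ++ (pvEO xs).1, e ++ (pvEO xs).2) := by
  have hmod : ∀ a : Int, PySem.Int.mod a 2 = a % 2 := fun a =>
    PySem.Int.mod_eq_emod_of_pos (by norm_num)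
  induction xs with
  | nil => intro s o e; simp [PySem.List.enumerate_nil, pvEO]
  | cons x t ih =>
    intro s o e
    rw [PySem.List.enumerate_cons, List.foldl_cons]
    rcases Int.emod_two_eq_zero_or_one s with h | h
    · have h1 : PySem.Int.mod s 2 = 0 := by rw [hmod]; exact h
      have h2 : ¬ PySem.Int.mod (s + 1) 2 = 0 := by rw [hmod]; omega
      simp only [h1, reduceIte]
      rw [ih (s + 1)]
      simp only [h2, reduceIte, pvEO, List.append_assoc, List.singleton_append]
    · have h1 : ¬ PySem.Int.mod s 2 = 0 := by rw [hmod]; omega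
      have h2 : PySem.Int.mod (s + 1) 2 = 0 := by rw [hmod]; omega
      simp only [h1, reduceIte]
      rw [ih (s + 1)]
      simp only [h2, reduceIte, pvEO, List.append_assoc, List.singleton_append]

theorem pvA_eq (xs : List Int) : divide_odds_and_evens xs = ((pvEO xs).2, (pvEO xs).1) := by
  have h := pvA_enum xs 0 [] []
  rw [PySem.List.enumerate_eq_map_pyRange xs 0, List.foldl_map] at h
  unfold divide_odds_and_evens
  simp only [show PySem.Int.mod (0 : Int) 2 = 0 from by decide, if_true, List.nil_append] at h
  exact h

-- ===== VERDICT (by name: the statement is the Claim_ definition above) =====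
theorem divide_odds_and_evens_spec : Claim_equal_divide_odds_and_evens := by
  intro numbers _
  unfold Spec_divide_odds_and_evens
  rw [pvA_eq, pvAlt_eq]
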